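-- pv_equiv track=rewrite | github.com/alijamba/C-CompilerinPython | CC Assignment/Assignment2/Main.py | Anonomous_function
-- ===== SOURCE A (Python) =====
-- def Anonomous_function(exprs): # fiver4 call from the main function , conjucated by the other fucntion
-- 	lengthofexps=len(exprs)  #this tells the length of the expressions
-- 	checked = 0
-- 	string_ofstatments = ""
-- 	while checked < lengthofexps:
-- 		if checked < lengthofexps-1:
-- 			string_ofstatments += 'opexp;'   # This is before the ending of the opexpression such that it has a semicolon
-- 			checked += 1
-- 		else:
-- 			string_ofstatments += 'opexp'  # this is the ending of the opexpression such that it doesnt have semicolon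
-- 			checked += 1
-- 	return string_ofstatments
-- ===== SOURCE B (Python) =====
-- def Anonomous_function(exprs):
--     # closed form: repeat ';opexp' once per expression, then drop the leading ';'
--     return (';opexp' * len(exprs))[1:]
-- ===== Notes on version B (the rewrite author's own statement) =====
-- stated objective: simpler
-- what changed: Replaces the counter-driven while loop with its last-element branch by a closed-form string repetition (';opexp' * n)[1:] with no loop or branch; also avoids A's quadratic repeated string concatenation.
import Mathlib
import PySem

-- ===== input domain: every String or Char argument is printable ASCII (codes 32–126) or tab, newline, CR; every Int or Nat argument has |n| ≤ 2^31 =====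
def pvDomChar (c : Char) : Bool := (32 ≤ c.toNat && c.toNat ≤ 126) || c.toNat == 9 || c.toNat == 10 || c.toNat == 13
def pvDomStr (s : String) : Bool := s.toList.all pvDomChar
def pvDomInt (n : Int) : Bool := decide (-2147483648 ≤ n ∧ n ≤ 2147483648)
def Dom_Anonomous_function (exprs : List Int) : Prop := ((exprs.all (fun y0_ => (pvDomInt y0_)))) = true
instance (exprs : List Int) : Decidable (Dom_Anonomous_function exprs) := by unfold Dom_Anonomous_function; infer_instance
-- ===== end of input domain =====

-- B is a closed-form build (repeat the separator+token, drop the leading ';') replacing A's counter loop; objective: simpler.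

-- ===== PORT A =====
-- the while loop: state (checked, string_ofstatments), bound lengthofexps
def pvALoop (lengthofexps checked : Nat) (string_ofstatments : List Char) : List Char :=
  if checked < lengthofexps then
    if checked < lengthofexps - 1 then
      pvALoop lengthofexps (checked + 1) (string_ofstatments ++ "opexp;".toList)
    else
      pvALoop lengthofexps (checked + 1) (string_ofstatments ++ "opexp".toList)
  else string_ofstatments
termination_by lengthofexps - checked

def Anonomous_function (exprs : List Int) : String :=
  String.ofList (pvALoop exprs.length 0 [])

-- ===== PORT B =====
-- (';opexp' * len(exprs))[1:]
def Anonomous_function_alt (exprs : List Int) : String :=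
  String.ofList (PySem.List.slice ((List.replicate exprs.length ";opexp".toList).flatten) (some 1) none)

-- ===== PRECONDITION & SPEC =====
def Spec_Anonomous_function (exprs : List Int) (out : String) : Prop := out = Anonomous_function_alt exprs
instance (exprs : List Int) (out : String) : Decidable (Spec_Anonomous_function exprs out) := by unfold Spec_Anonomous_function; infer_instance

-- ===== CLAIM (what is proved, stated in full; the proofs are below) =====
def Claim_equal_Anonomous_function : Prop := ∀ (exprs : List Int), Dom_Anonomous_function exprs → Spec_Anonomous_function exprs (Anonomous_function exprs)

-- ===== LEMMAS AND PROOFS =====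

theorem pvALoop_spec (d n checked : Nat) (acc : List Char) (hd : d = n - checked) :
    pvALoop n checked acc =
      acc ++ (if checked < n then "opexp".toList ++ (List.replicate (n - 1 - checked) ";opexp".toList).flatten else []) := by
  induction d generalizing checked acc with
  | zero =>
    rw [pvALoop]
    have : ¬ checked < n := by omega
    simp [this]
  | succ k ih =>
    have hlt : checked < n := by omega
    rw [pvALoop]
    by_cases h1 : checked < n - 1
    · simp only [hlt, if_true, h1]
      rw [ih (checked + 1) _ (by omega)]
      have h2 : checked + 1 < n := by omega
      have h3 : n - 1 - checked = (n - 1 - (checked + 1)) + 1 := by omega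
      simp [h2, h3, List.replicate_succ]
    · simp only [hlt, if_true, h1, if_false]
      rw [ih (checked + 1) _ (by omega)]
      have h2 : ¬ checked + 1 < n := by omega
      have h3 : n - 1 - checked = 0 := by omega
      simp [h2, h3]

theorem Anonomous_function_spec : Claim_equal_Anonomous_function := by
  intro exprs _
  unfold Spec_Anonomous_function Anonomous_function Anonomous_function_alt
  rw [pvALoop_spec (exprs.length - 0) exprs.length 0 [] rfl]
  rw [show ((1 : Int)) = ((1 : Nat) : Int) from rfl, PySem.List.slice_from_natCast]
  cases exprs with
  | nil => rfl
  | cons x xs =>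
    simp only [List.nil_append, List.length_cons, List.replicate_succ,
      List.flatten_cons]
    rfl
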